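-- pv_equiv track=rewrite | github.com/may-gvg/Szkolenie | 3 Zadania z iterowania i flow/logging with flow.py | liczby_podzielne
-- ===== SOURCE A (Python) =====
-- def liczby_podzielne(n, wystapienia, liczba):
--     licznik_iteracji = 1
--     lista = []
--     for i in range(1, n):
--         if licznik_iteracji > wystapienia:
--             break
--         if i % liczba == 0:
--             lista.append(i)
--             licznik_iteracji += 1
--     return lista
-- ===== SOURCE B (Python) =====
-- def liczby_podzielne(n, wystapienia, liczba):
--     # closed form: the first min(wystapienia, (n-1)//|liczba|) positive multiples of |liczba|
--     if n <= 1 or wystapienia <= 0: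
--         return []
--     step = abs(liczba)
--     count = min((n - 1) // step, wystapienia)
--     return [step * j for j in range(1, count + 1)]
-- ===== Notes on version B (the rewrite author's own statement) =====
-- stated objective: faster
-- what changed: Replaces the O(n) scan of every i in range(1,n) with a closed-form count and direct generation of the multiples step*j for j=1..min((n-1)//|liczba|, wystapienia).
import Mathlib
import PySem

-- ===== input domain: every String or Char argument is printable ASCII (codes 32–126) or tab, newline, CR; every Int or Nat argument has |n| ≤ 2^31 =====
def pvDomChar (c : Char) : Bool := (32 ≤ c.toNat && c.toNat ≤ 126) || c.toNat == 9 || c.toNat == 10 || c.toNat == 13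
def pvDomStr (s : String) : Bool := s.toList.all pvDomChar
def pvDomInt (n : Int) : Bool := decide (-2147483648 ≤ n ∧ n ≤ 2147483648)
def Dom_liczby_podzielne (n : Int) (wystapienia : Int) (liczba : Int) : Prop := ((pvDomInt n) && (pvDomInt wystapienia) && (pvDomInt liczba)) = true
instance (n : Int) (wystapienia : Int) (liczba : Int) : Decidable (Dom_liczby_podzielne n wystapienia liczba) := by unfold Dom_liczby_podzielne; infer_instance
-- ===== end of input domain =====

-- ===== PORT A =====
-- B re-implements the O(n) scan as a closed form over multiples: O(min(wystapienia,(n-1)/|liczba|)).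
-- go: A's `for i in range(1, n)` loop, i counting up from 1, with state (licznik_iteracji, lista);
-- returning lista models `break`; recursion on the index keeps evaluation lazy like Python's range.
def liczby_podzielne_go (n wystapienia liczba : Int) (i licznik : Int) (lista : List Int) : List Int :=
  if i < n then
    if licznik > wystapienia then lista
    else if PySem.Int.mod i liczba = 0 then
      liczby_podzielne_go n wystapienia liczba (i + 1) (licznik + 1) (lista ++ [i])
    else
      liczby_podzielne_go n wystapienia liczba (i + 1) licznik lista
  else lista
termination_by (n - i).toNat
decreasing_by all_goals omega

def liczby_podzielne (n : Int) (wystapienia : Int) (liczba : Int) : List Int :=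
  liczby_podzielne_go n wystapienia liczba 1 1 []

-- ===== PORT B =====
def liczby_podzielne_alt (n : Int) (wystapienia : Int) (liczba : Int) : List Int :=
  if n ≤ 1 ∨ wystapienia ≤ 0 then []
  else
    let step := |liczba|
    let count := min (PySem.Int.floordiv (n - 1) step) wystapienia
    (PySem.List.pyRange 1 (count + 1) 1).map (fun j => step * j)

-- ===== PRECONDITION & SPEC =====
-- Pre_ excludes exactly the inputs where Python A raises ZeroDivisionError (liczba = 0 with a
-- running loop, i.e. n ≥ 2 and wystapienia ≥ 1); B raises there too (ZeroDivisionError on (n-1)//0).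
def Pre_liczby_podzielne (n : Int) (wystapienia : Int) (liczba : Int) : Prop :=
  liczba ≠ 0 ∨ n ≤ 1 ∨ wystapienia ≤ 0
instance (n : Int) (wystapienia : Int) (liczba : Int) : Decidable (Pre_liczby_podzielne n wystapienia liczba) := by unfold Pre_liczby_podzielne; infer_instance
def pvWitness_liczby_podzielne : Int × Int × Int := (10, 2, 3)

def Spec_liczby_podzielne (n : Int) (wystapienia : Int) (liczba : Int) (out : List Int) : Prop := out = liczby_podzielne_alt n wystapienia liczba
instance (n : Int) (wystapienia : Int) (liczba : Int) (out : List Int) : Decidable (Spec_liczby_podzielne n wystapienia liczba out) := by unfold Spec_liczby_podzielne; infer_instance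

-- ===== CLAIM (what is proved, stated in full; the proofs are below) =====
def Claim_equal_liczby_podzielne : Prop := ∀ (n : Int) (wystapienia : Int) (liczba : Int), Dom_liczby_podzielne n wystapienia liczba → Pre_liczby_podzielne n wystapienia liczba → Spec_liczby_podzielne n wystapienia liczba (liczby_podzielne n wystapienia liczba)

-- ===== LEMMAS AND PROOFS =====

-- ediv of a-1 versus a, for a positive divisor
lemma ediv_pred_of_dvd {m a : Int} (hm : 0 < m) (h : m ∣ a) : (a - 1) / m = a / m - 1 := by
  obtain ⟨q, rfl⟩ := h
  rw [Int.mul_ediv_cancel_left _ hm.ne']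
  rw [show m * q - 1 = (m - 1) + (q - 1) * m by ring]
  rw [Int.add_mul_ediv_right _ _ hm.ne']
  rw [Int.ediv_eq_zero_of_lt (by omega) (by omega)]
  omega

lemma ediv_pred_of_not_dvd {m a : Int} (hm : 0 < m) (h : ¬ m ∣ a) : (a - 1) / m = a / m := by
  have h1 := Int.mul_ediv_add_emod a m
  have h2 : 0 ≤ a % m := Int.emod_nonneg a hm.ne'
  have h3 : a % m < m := Int.emod_lt_of_pos a hm
  have h4 : a % m ≠ 0 := fun hc => h (Int.dvd_of_emod_eq_zero hc)
  rw [show a - 1 = (a % m - 1) + m * (a / m) by omega]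
  rw [Int.add_mul_ediv_left _ _ hm.ne', Int.ediv_eq_zero_of_lt (by omega) (by omega)]
  omega

-- the loop invariant: at position a (1 ≤ a) with counter `licznik` and accumulator `lista`,
-- the loop appends the next multiples of m = |liczba|, their count bounded by both remaining caps
lemma liczby_podzielne_go_spec (w liczba : Int) (hl : liczba ≠ 0) (n : Int) :
    ∀ (k : Nat) (a licznik : Int) (lista : List Int), (n - a).toNat = k → 1 ≤ a →
    liczby_podzielne_go n w liczba a licznik lista
      = lista ++ (List.range (min ((n - 1) / |liczba| - (a - 1) / |liczba|) (w - licznik + 1)).toNat).map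
          (fun (j : Nat) => |liczba| * ((a - 1) / |liczba| + 1 + (j : Int))) := by
  have hm : 0 < |liczba| := abs_pos.mpr hl
  intro k
  induction k with
  | zero =>
    intro a licznik lista hk ha
    have hna : ¬ a < n := by omega
    have hmono : (n - 1) / |liczba| ≤ (a - 1) / |liczba| := Int.ediv_le_ediv hm (by omega)
    have : (min ((n - 1) / |liczba| - (a - 1) / |liczba|) (w - licznik + 1)).toNat = 0 := by omega
    rw [liczby_podzielne_go, if_neg hna]
    simp [this]
  | succ k ih =>
    intro a licznik lista hk ha
    by_cases han : a < n
    · rw [liczby_podzielne_go, if_pos han]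
      by_cases hlw : licznik > w
      · have : (min ((n - 1) / |liczba| - (a - 1) / |liczba|) (w - licznik + 1)).toNat = 0 := by
          have := min_le_right ((n - 1) / |liczba| - (a - 1) / |liczba|) (w - licznik + 1)
          omega
        simp [hlw, this]
      · by_cases hdvd : |liczba| ∣ a
        · have hmod : PySem.Int.mod a liczba = 0 := by
            rw [PySem.Int.mod_eq_zero_iff_dvd]
            exact (abs_dvd _ _).mp hdvd
          rw [if_neg hlw, if_pos hmod]
          rw [ih (a + 1) (licznik + 1) (lista ++ [a]) (by omega) (by omega)]
          have hs : a / |liczba| = (a - 1) / |liczba| + 1 := by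
            have := ediv_pred_of_dvd hm hdvd; omega
          have hmono : a / |liczba| ≤ (n - 1) / |liczba| := Int.ediv_le_ediv hm (by omega)
          set e := (n - 1) / |liczba| with he
          set s := (a - 1) / |liczba| with hsdef
          have hsimp : (a + 1 - 1) / |liczba| = s + 1 := by
            rw [show a + 1 - 1 = a by ring]; omega
          rw [hsimp]
          have hc : (min (e - s) (w - licznik + 1)).toNat
              = (min (e - (s + 1)) (w - (licznik + 1) + 1)).toNat + 1 := by omega
          rw [hc, List.range_succ_eq_map]
          have hfa : |liczba| * (s + 1) = a := by
            rw [← hs]; exact Int.mul_ediv_cancel' hdvd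
          rw [List.append_assoc]
          congr 1
          simp only [List.map_cons, List.map_map, List.cons_append, List.nil_append]
          congr 1
          · simpa using hfa.symm
          · apply List.map_congr_left
            intro j _
            simp only [Function.comp_apply]
            push_cast; ring
        · have hmod : ¬ PySem.Int.mod a liczba = 0 := by
            rw [PySem.Int.mod_eq_zero_iff_dvd]
            exact fun h => hdvd ((abs_dvd _ _).mpr h)
          rw [if_neg hlw, if_neg hmod]
          rw [ih (a + 1) licznik lista (by omega) (by omega)]
          have hs := ediv_pred_of_not_dvd hm hdvd
          rw [show a + 1 - 1 = a by ring, hs]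
    · omega

lemma pyRange_one_shift (c : Nat) :
    PySem.List.pyRange 1 ((c : Int) + 1) 1 = (List.range c).map (fun (j : Nat) => 1 + (j : Int)) := by
  rw [PySem.List.pyRange_one]
  have : ((c : Int) + 1 - 1).toNat = c := by omega
  rw [this]

-- ===== VERDICT (by name: the statement is the Claim_ definition above) =====
theorem liczby_podzielne_spec : Claim_equal_liczby_podzielne := by
  intro n w l _ hpre
  unfold Spec_liczby_podzielne liczby_podzielne liczby_podzielne_alt
  by_cases h1 : n ≤ 1 ∨ w ≤ 0
  · rw [if_pos h1]
    rw [liczby_podzielne_go]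
    rcases h1 with h | h
    · rw [if_neg (by omega)]
    · split
      · rw [if_pos (by omega)]
      · rfl
  · rw [if_neg h1]
    push Not at h1
    obtain ⟨hn, hw⟩ := h1
    have hl : l ≠ 0 := by
      rcases hpre with h | h | h
      · exact h
      · omega
      · omega
    have hm : 0 < |l| := abs_pos.mpr hl
    rw [liczby_podzielne_go_spec w l hl n (n - 1).toNat 1 1 [] (by omega) (by omega)]
    simp only [List.nil_append]
    rw [PySem.Int.floordiv_eq_ediv_of_pos hm]
    set c := min ((n - 1) / |l|) w with hc
    have hc0 : 0 ≤ c := by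
      have : 0 ≤ (n - 1) / |l| := Int.ediv_nonneg (by omega) (by omega)
      omega
    have hcast : c = ((c.toNat : Int)) := by omega
    rw [hcast, pyRange_one_shift c.toNat, List.map_map]
    have hz : ((1 : Int) - 1) / |l| = 0 := by norm_num
    have harg : (min ((n - 1) / |l| - (1 - 1) / |l|) (w - 1 + 1)).toNat = c.toNat := by
      rw [hz]; omega
    rw [harg]
    apply List.map_congr_left
    intro j _
    simp only [Function.comp_apply, hz]
    ring
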